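-- pv_equiv track=rewrite | github.com/adikatre/scrapp-backend | final/categories.py | build_coco_to_bin
-- ===== SOURCE A (Python) =====
-- recycle = {
--     "bottle", "wine glass", "cup", "bowl",
--     "book", "clock", "vase"
-- }
--
-- compost = {
--     "banana", "apple", "sandwich", "orange",
--     "broccoli", "carrot", "hot dog", "pizza"
-- }
--
-- e_waste = {
--     "tv", "laptop", "mouse", "remote",
--     "keyboard", "cell phone", "clock"
-- }
--
-- bulky_items = {
--     "chair", "couch", "potted plant", "bed", "dining table"
-- }
--
-- hazardous = {
--     "microwave", "oven", "toaster", "sink",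
--     "refrigerator", "hair drier", "toothbrush"
-- }
--
-- single_use = {
--     "backpack", "umbrella", "handbag", "suitcase",
--     "sports ball", "fork", "knife", "spoon"
-- }
--
-- city_infra = {
--     "traffic light", "fire hydrant", "stop sign"
-- }
--
-- living_things = {
--     "person", "bird", "cat", "dog", "horse",
--     "sheep", "cow", "elephant", "bear", "zebra", "giraffe"
-- }
--
-- general_trash = {
--     "parking meter", "bench", "tie", "frisbee",
--     "skis", "snowboard", "baseball bat", "baseball glove",
--     "skateboard", "surfboard", "tennis racket",
--     "donut", "cake", "scissors", "teddy bear"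
-- }
--
-- default_route = "Landfill / Donate / Check rules"
--
-- def build_coco_to_bin(model_names):
--     """Map COCO class names to disposal bins."""
--     COCO_TO_BIN = {}
--     for _, name in model_names.items():
--         if name in recycle:
--             COCO_TO_BIN[name] = "Recycle"
--         elif name in compost:
--             COCO_TO_BIN[name] = "Compost"
--         elif name in e_waste:
--             COCO_TO_BIN[name] = "E-Waste"
--         elif name in bulky_items:
--             COCO_TO_BIN[name] = "Bulky Items"
--         elif name in hazardous:
--             COCO_TO_BIN[name] = "Hazardous Waste"
--         elif name in single_use:
--             COCO_TO_BIN[name] = "Single-Use Items"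
--         elif name in city_infra:
--             COCO_TO_BIN[name] = "City Infrastructure"
--         elif name in living_things:
--             COCO_TO_BIN[name] = "Living Things"
--         elif name in general_trash:
--             COCO_TO_BIN[name] = "General Trash"
--         else:
--             COCO_TO_BIN[name] = default_route
--     return COCO_TO_BIN
-- ===== SOURCE B (Python) =====
-- recycle = {
--     "bottle", "wine glass", "cup", "bowl",
--     "book", "clock", "vase"
-- }
--
-- compost = {
--     "banana", "apple", "sandwich", "orange",
--     "broccoli", "carrot", "hot dog", "pizza"
-- }
--
-- e_waste = {
--     "tv", "laptop", "mouse", "remote",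
--     "keyboard", "cell phone", "clock"
-- }
--
-- bulky_items = {
--     "chair", "couch", "potted plant", "bed", "dining table"
-- }
--
-- hazardous = {
--     "microwave", "oven", "toaster", "sink",
--     "refrigerator", "hair drier", "toothbrush"
-- }
--
-- single_use = {
--     "backpack", "umbrella", "handbag", "suitcase",
--     "sports ball", "fork", "knife", "spoon"
-- }
--
-- city_infra = {
--     "traffic light", "fire hydrant", "stop sign"
-- }
--
-- living_things = {
--     "person", "bird", "cat", "dog", "horse",
--     "sheep", "cow", "elephant", "bear", "zebra", "giraffe"
-- }
--
-- general_trash = {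
--     "parking meter", "bench", "tie", "frisbee",
--     "skis", "snowboard", "baseball bat", "baseball glove",
--     "skateboard", "surfboard", "tennis racket",
--     "donut", "cake", "scissors", "teddy bear"
-- }
--
-- default_route = "Landfill / Donate / Check rules"
--
-- _ROUTES = [
--     (recycle, "Recycle"),
--     (compost, "Compost"),
--     (e_waste, "E-Waste"),
--     (bulky_items, "Bulky Items"),
--     (hazardous, "Hazardous Waste"),
--     (single_use, "Single-Use Items"),
--     (city_infra, "City Infrastructure"),
--     (living_things, "Living Things"),
--     (general_trash, "General Trash"),
-- ]
--
-- def build_coco_to_bin(model_names):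
--     """Map COCO class names to disposal bins."""
--     # Stage 1: one pass over the names, everything routed to the default.
--     coco = {name: default_route for name in model_names.values()}
--     # Stage 2: sweep the whole table once per category, lowest priority first,
--     # overwriting matches; the last (highest-priority) sweep wins, so overlaps
--     # like 'clock' end up in the highest-priority bin, exactly as the if/elif chain.
--     for items, label in reversed(_ROUTES):
--         for name in coco:
--             if name in items:
--                 coco[name] = label
--     return coco
-- ===== Notes on version B (the rewrite author's own statement) =====
-- stated objective: alternative
-- what changed: Instead of classifying each incoming name through a nine-branch if/elif chain, B first builds the whole table mapping every name to the default route, then makes one overwrite sweep over the table per category in reverse priority order, so the last (highest-priority) sweep wins for overlapping names like 'clock'.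
import Mathlib
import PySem

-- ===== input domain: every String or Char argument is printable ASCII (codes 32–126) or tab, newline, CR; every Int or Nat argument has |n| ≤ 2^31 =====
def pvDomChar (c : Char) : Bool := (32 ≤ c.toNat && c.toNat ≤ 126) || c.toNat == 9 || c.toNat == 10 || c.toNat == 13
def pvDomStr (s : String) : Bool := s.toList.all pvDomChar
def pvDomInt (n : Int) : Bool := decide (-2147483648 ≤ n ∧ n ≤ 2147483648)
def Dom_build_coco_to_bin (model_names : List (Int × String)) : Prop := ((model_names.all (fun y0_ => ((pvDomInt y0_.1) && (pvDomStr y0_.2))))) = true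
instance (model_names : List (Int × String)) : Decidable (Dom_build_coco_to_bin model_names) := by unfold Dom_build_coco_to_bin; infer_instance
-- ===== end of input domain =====

-- B replaces A's per-name nine-branch if/elif classification by staged sweeps: build the
-- whole table mapped to the default, then one overwrite pass per category in reverse
-- priority order (objective: alternative); return value proved equal on all inputs.

-- ===== PORT A =====
def pvRecycle : List String := ["bottle", "wine glass", "cup", "bowl", "book", "clock", "vase"]
def pvCompost : List String := ["banana", "apple", "sandwich", "orange", "broccoli", "carrot", "hot dog", "pizza"]
def pvEWaste : List String := ["tv", "laptop", "mouse", "remote", "keyboard", "cell phone", "clock"]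
def pvBulky : List String := ["chair", "couch", "potted plant", "bed", "dining table"]
def pvHazardous : List String := ["microwave", "oven", "toaster", "sink", "refrigerator", "hair drier", "toothbrush"]
def pvSingleUse : List String := ["backpack", "umbrella", "handbag", "suitcase", "sports ball", "fork", "knife", "spoon"]
def pvCityInfra : List String := ["traffic light", "fire hydrant", "stop sign"]
def pvLivingThings : List String := ["person", "bird", "cat", "dog", "horse", "sheep", "cow", "elephant", "bear", "zebra", "giraffe"]
def pvGeneralTrash : List String := ["parking meter", "bench", "tie", "frisbee", "skis", "snowboard", "baseball bat", "baseball glove", "skateboard", "surfboard", "tennis racket", "donut", "cake", "scissors", "teddy bear"]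
def pvDefaultRoute : String := "Landfill / Donate / Check rules"

def build_coco_to_bin (model_names : List (Int × String)) : List (String × String) :=
  (model_names.foldl (fun d p =>
    let name := p.2
    if pvRecycle.contains name then d.insert name "Recycle"
    else if pvCompost.contains name then d.insert name "Compost"
    else if pvEWaste.contains name then d.insert name "E-Waste"
    else if pvBulky.contains name then d.insert name "Bulky Items"
    else if pvHazardous.contains name then d.insert name "Hazardous Waste"
    else if pvSingleUse.contains name then d.insert name "Single-Use Items"
    else if pvCityInfra.contains name then d.insert name "City Infrastructure"
    else if pvLivingThings.contains name then d.insert name "Living Things"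
    else if pvGeneralTrash.contains name then d.insert name "General Trash"
    else d.insert name pvDefaultRoute) (PySem.Dict.empty : PySem.Dict String String)).items

-- ===== PORT B =====
def pvRoutes : List (List String × String) :=
  [(pvRecycle, "Recycle"), (pvCompost, "Compost"), (pvEWaste, "E-Waste"),
   (pvBulky, "Bulky Items"), (pvHazardous, "Hazardous Waste"),
   (pvSingleUse, "Single-Use Items"), (pvCityInfra, "City Infrastructure"),
   (pvLivingThings, "Living Things"), (pvGeneralTrash, "General Trash")]

def build_coco_to_bin_alt (model_names : List (Int × String)) : List (String × String) :=
  -- stage 1: every name routed to the default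
  let coco0 := model_names.foldl (fun d p => d.insert p.2 pvDefaultRoute)
    (PySem.Dict.empty : PySem.Dict String String)
  -- stage 2: one overwrite sweep of the whole table per category, reverse priority order
  let coco := pvRoutes.reverse.foldl (fun d r =>
    d.keys.foldl (fun d name => if r.1.contains name then d.insert name r.2 else d) d) coco0
  coco.items

-- ===== PRECONDITION & SPEC =====
def Spec_build_coco_to_bin (model_names : List (Int × String)) (out : List (String × String)) : Prop := out = build_coco_to_bin_alt model_names
instance (model_names : List (Int × String)) (out : List (String × String)) : Decidable (Spec_build_coco_to_bin model_names out) := by unfold Spec_build_coco_to_bin; infer_instance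

-- ===== CLAIM (what is proved, stated in full; the proofs are below) =====
def Claim_equal_build_coco_to_bin : Prop := ∀ (model_names : List (Int × String)), Dom_build_coco_to_bin model_names → Spec_build_coco_to_bin model_names (build_coco_to_bin model_names)

-- ===== LEMMAS AND PROOFS =====

-- all item names that occur in any category set
def pvAllItems : List String :=
  pvRecycle ++ pvCompost ++ pvEWaste ++ pvBulky ++ pvHazardous ++ pvSingleUse ++
  pvCityInfra ++ pvLivingThings ++ pvGeneralTrash

-- A's if/elif chain as a function of the name alone
def pvRouteA (name : String) : String :=
  if pvRecycle.contains name then "Recycle"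
  else if pvCompost.contains name then "Compost"
  else if pvEWaste.contains name then "E-Waste"
  else if pvBulky.contains name then "Bulky Items"
  else if pvHazardous.contains name then "Hazardous Waste"
  else if pvSingleUse.contains name then "Single-Use Items"
  else if pvCityInfra.contains name then "City Infrastructure"
  else if pvLivingThings.contains name then "Living Things"
  else if pvGeneralTrash.contains name then "General Trash"
  else pvDefaultRoute

-- B's reverse sweeps, as a function of the name alone
def pvRouteB (name : String) : String :=
  pvRoutes.reverse.foldl (fun v r => if r.1.contains name then r.2 else v) pvDefaultRoute

set_option maxRecDepth 100000 in
set_option maxHeartbeats 2000000 in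
lemma pvRoute_eq (name : String) : pvRouteA name = pvRouteB name := by
  by_cases h : name ∈ pvAllItems
  · fin_cases h <;> rfl
  · simp [pvAllItems, pvRecycle, pvCompost, pvEWaste, pvBulky, pvHazardous, pvSingleUse,
      pvCityInfra, pvLivingThings, pvGeneralTrash] at h
    simp [pvRouteA, pvRouteB, pvRoutes, pvRecycle, pvCompost, pvEWaste, pvBulky, pvHazardous,
      pvSingleUse, pvCityInfra, pvLivingThings, pvGeneralTrash, h]

-- the A-side fold inserts p.2 ↦ pvRouteA p.2 at every step
lemma pvA_step (d : PySem.Dict String String) (p : Int × String) :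
    (let name := p.2
     if pvRecycle.contains name then d.insert name "Recycle"
     else if pvCompost.contains name then d.insert name "Compost"
     else if pvEWaste.contains name then d.insert name "E-Waste"
     else if pvBulky.contains name then d.insert name "Bulky Items"
     else if pvHazardous.contains name then d.insert name "Hazardous Waste"
     else if pvSingleUse.contains name then d.insert name "Single-Use Items"
     else if pvCityInfra.contains name then d.insert name "City Infrastructure"
     else if pvLivingThings.contains name then d.insert name "Living Things"
     else if pvGeneralTrash.contains name then d.insert name "General Trash"
     else d.insert name pvDefaultRoute) = d.insert p.2 (pvRouteA p.2) := by
  simp only [pvRouteA, apply_ite (d.insert p.2)]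

-- lookup after a fold that inserts key ↦ f key
lemma get?_foldl_insert_fun (f : String → String) (l : List (Int × String)) (d : PySem.Dict String String) (k : String) :
    (l.foldl (fun d p => d.insert p.2 (f p.2)) d).get? k =
      if k ∈ l.map Prod.snd then some (f k) else d.get? k := by
  induction l generalizing d with
  | nil => simp
  | cons p l ih =>
    simp only [List.foldl_cons, ih, List.map_cons, List.mem_cons]
    by_cases hk : k ∈ l.map Prod.snd
    · simp [hk]
    · by_cases he : k = p.2
      · simp [he, PySem.Dict.get?_insert_self]
      · rw [PySem.Dict.get?_insert_of_ne d (f p.2) he]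
        simp [hk, he]

-- keys of such a fold depend only on the key list
lemma keys_foldl_insert_fun (f g : String → String) (l : List (Int × String)) (d : PySem.Dict String String) :
    (l.foldl (fun d p => d.insert p.2 (f p.2)) d).keys =
    (l.foldl (fun d p => d.insert p.2 (g p.2)) d).keys := by
  rw [PySem.Dict.keys_foldl_insert_key l Prod.snd (fun d p => f p.2) d,
      PySem.Dict.keys_foldl_insert_key l Prod.snd (fun d p => g p.2) d]

-- one sweep: keys are preserved
lemma pass_keys (items : List String) (label : String) :
    ∀ (ks : List String) (d : PySem.Dict String String), (∀ k ∈ ks, d.contains k = true) →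
    (ks.foldl (fun d n => if items.contains n then d.insert n label else d) d).keys = d.keys := by
  intro ks
  induction ks with
  | nil => intro d _; rfl
  | cons k ks ih =>
    intro d hc
    simp only [List.foldl_cons]
    by_cases hm : items.contains k
    · rw [hm]
      simp only [if_true]
      have hk : d.contains k = true := hc k (List.mem_cons_self ..)
      have hkeys := PySem.Dict.keys_insert_of_contains d label hk
      rw [ih (d.insert k label) ?_, hkeys]
      intro x hx
      rw [PySem.Dict.contains_insert]
      simp [hc x (List.mem_cons_of_mem _ hx)]
    · simp only [hm]
      exact ih d (fun x hx => hc x (List.mem_cons_of_mem _ hx))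

-- one sweep: lookups
lemma pass_get? (items : List String) (label : String) :
    ∀ (ks : List String) (d : PySem.Dict String String) (x : String),
    (ks.foldl (fun d n => if items.contains n then d.insert n label else d) d).get? x =
      if x ∈ ks ∧ items.contains x then some label else d.get? x := by
  intro ks
  induction ks with
  | nil => intro d x; simp
  | cons k ks ih =>
    intro d x
    simp only [List.foldl_cons, ih, List.mem_cons]
    by_cases hm : items.contains k = true
    · rw [if_pos hm, PySem.Dict.get?_insert]
      by_cases h1 : x ∈ ks ∧ items.contains x = true
      · rw [if_pos h1, if_pos ⟨Or.inr h1.1, h1.2⟩]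
      · rw [if_neg h1]
        by_cases h2 : x = k
        · subst h2
          rw [if_pos rfl, if_pos ⟨Or.inl rfl, hm⟩]
        · rw [if_neg h2, if_neg (fun h => h.1.elim h2 (fun hks => h1 ⟨hks, h.2⟩))]
    · rw [if_neg hm]
      by_cases h1 : x ∈ ks ∧ items.contains x = true
      · rw [if_pos h1, if_pos ⟨Or.inr h1.1, h1.2⟩]
      · rw [if_neg h1,
           if_neg (fun h => h.1.elim (fun hx => hm (hx ▸ h.2)) (fun hks => h1 ⟨hks, h.2⟩))]

-- one full-table sweep expressed as a map on get?
lemma sweep_get? (items : List String) (label : String) (d : PySem.Dict String String) (x : String) :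
    (d.keys.foldl (fun d n => if items.contains n then d.insert n label else d) d).get? x =
      (d.get? x).map (fun v => if items.contains x then label else v) := by
  rw [pass_get?]
  by_cases hk : x ∈ d.keys
  · have hs : (d.get? x).isSome := by
      by_contra h
      rw [Option.not_isSome_iff_eq_none] at h
      exact (PySem.Dict.get?_eq_none_iff_not_mem_keys d x).mp h hk
    obtain ⟨v, hv⟩ := Option.isSome_iff_exists.mp hs
    rw [hv]
    simp only [Option.map_some]
    simp only [hk, true_and]
    split_ifs <;> rfl
  · have hn : d.get? x = none := (PySem.Dict.get?_eq_none_iff_not_mem_keys d x).mpr hk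
    simp [hk, hn]

-- one full-table sweep preserves keys
lemma sweep_keys (items : List String) (label : String) (d : PySem.Dict String String) :
    (d.keys.foldl (fun d n => if items.contains n then d.insert n label else d) d).keys = d.keys := by
  apply pass_keys
  intro k hk
  exact (PySem.Dict.contains_iff_mem_keys d k).mpr hk

-- iterated sweeps over a route list, as a map on get?
lemma sweeps_get? (routes : List (List String × String)) :
    ∀ (d : PySem.Dict String String) (x : String),
    ((routes.foldl (fun d r =>
        d.keys.foldl (fun d n => if r.1.contains n then d.insert n r.2 else d) d) d).get? x) =
      (d.get? x).map (fun v => routes.foldl (fun v r => if r.1.contains x then r.2 else v) v) := by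
  induction routes with
  | nil => intro d x; cases h : d.get? x <;> simp [h]
  | cons r routes ih =>
    intro d x
    simp only [List.foldl_cons, ih, sweep_get?]
    cases h : d.get? x <;> simp

theorem build_coco_to_bin_spec_aux (model_names : List (Int × String)) :
    build_coco_to_bin model_names = build_coco_to_bin_alt model_names := by
  unfold build_coco_to_bin build_coco_to_bin_alt
  simp only [pvA_step]
  set dA := model_names.foldl (fun d p => d.insert p.2 (pvRouteA p.2))
    (PySem.Dict.empty : PySem.Dict String String) with hdA
  set d0 := model_names.foldl (fun d p => d.insert p.2 pvDefaultRoute)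
    (PySem.Dict.empty : PySem.Dict String String) with hd0
  set dB := pvRoutes.reverse.foldl (fun d r =>
    d.keys.foldl (fun d n => if r.1.contains n then d.insert n r.2 else d) d) d0 with hdB
  -- d0 as an insert-of-function fold
  have hd0' : d0 = model_names.foldl
      (fun d p => d.insert p.2 ((fun _ => pvDefaultRoute) p.2)) PySem.Dict.empty := rfl
  -- keys agree
  have hkeys : dA.keys = dB.keys := by
    rw [hdB]
    have hbk : dB.keys = d0.keys := by
      rw [hdB]
      generalize d0 = d
      induction pvRoutes.reverse generalizing d with
      | nil => rfl
      | cons r rs ih => simp only [List.foldl_cons]; rw [ih, sweep_keys]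
    rw [← hdB, hbk, hdA, hd0']
    exact keys_foldl_insert_fun pvRouteA (fun _ => pvDefaultRoute) model_names PySem.Dict.empty
  -- lookups agree
  have hget : ∀ x, dA.get? x = dB.get? x := by
    intro x
    rw [hdA, hdB, get?_foldl_insert_fun pvRouteA, sweeps_get?, hd0',
        get?_foldl_insert_fun (fun _ => pvDefaultRoute)]
    by_cases hx : x ∈ model_names.map Prod.snd
    · simp only [hx, if_true, Option.map_some]
      rw [pvRoute_eq]
      rfl
    · simp [hx]
  -- nodup keys on the A side
  have hnodA : dA.keys.Nodup := by
    rw [hdA]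
    exact PySem.Dict.nodup_keys_foldl_insert_key model_names Prod.snd _ _ PySem.Dict.nodup_keys_empty
  have hnodB : dB.keys.Nodup := hkeys ▸ hnodA
  -- items equal via keys + getD
  rw [PySem.Dict.items_eq_map_keys dA hnodA pvDefaultRoute,
      PySem.Dict.items_eq_map_keys dB hnodB pvDefaultRoute, ← hkeys]
  apply List.map_congr_left
  intro k _
  rw [PySem.Dict.getD_eq_get?_getD, PySem.Dict.getD_eq_get?_getD, hget]

-- ===== VERDICT (by name: the statement is the Claim_ definition above) =====
theorem build_coco_to_bin_spec : Claim_equal_build_coco_to_bin := by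
  intro model_names _
  exact build_coco_to_bin_spec_aux model_names
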